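-- pv_equiv track=rewrite | github.com/WuLC/LeetCode | Algorithm/321. Create Maximum Number.py | single_max
-- ===== SOURCE A (Python) =====
-- def single_max(nums, k):
--     drop = len(nums) - k
--     stack = []
--     for digit in nums:
--         while drop and stack and stack[-1] < digit:
--             stack.pop()
--             drop -= 1
--         stack.append(digit)
--     return stack[:k]
-- ===== SOURCE B (Python) =====
-- def single_max(nums, k):
--     # Slot-by-slot windowed-max greedy instead of a monotonic stack.
--     res = []
--     start = 0
--     n = len(nums)
--     t = min(k, n)  # cannot select more than n elements
--     for i in range(t):
--         end = n - (t - 1 - i)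
--         best = start
--         for j in range(start + 1, end):
--             if nums[j] > nums[best]:
--                 best = j
--         res.append(nums[best])
--         start = best + 1
--     return res
-- ===== Notes on version B (the rewrite author's own statement) =====
-- stated objective: alternative
-- what changed: Replaced the single-pass monotonic stack with drop counter by a slot-by-slot greedy that, for each of the min(k, n) output positions, scans the currently admissible window for the first maximum and advances past it.
-- intended difference: For k > len(nums) on a list with an adjacent increasing pair, A returns its pruned non-increasing stack (the negative drop counter stays truthy so elements keep getting popped), while B returns the whole list, which is the intended maximal selection when more elements are requested than exist. — e.g. on single_max([1, 2], 3): A returns [2], B returns [1, 2]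
-- outside the precondition, e.g. on single_max([2, 1], -1): A returns [2], B returns []
import Mathlib
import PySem

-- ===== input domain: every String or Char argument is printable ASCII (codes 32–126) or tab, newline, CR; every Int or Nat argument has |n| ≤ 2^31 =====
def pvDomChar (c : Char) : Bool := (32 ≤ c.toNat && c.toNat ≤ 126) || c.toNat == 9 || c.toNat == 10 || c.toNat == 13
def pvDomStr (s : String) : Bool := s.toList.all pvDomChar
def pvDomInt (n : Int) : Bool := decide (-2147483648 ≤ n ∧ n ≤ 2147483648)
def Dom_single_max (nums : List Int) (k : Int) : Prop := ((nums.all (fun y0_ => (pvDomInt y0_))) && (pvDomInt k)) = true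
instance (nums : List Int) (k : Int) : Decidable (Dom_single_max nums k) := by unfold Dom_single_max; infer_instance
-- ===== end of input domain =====

-- B replaces the monotonic stack by a slot-by-slot windowed first-maximum greedy (alternative algorithm, no speed claim).

-- ===== PORT A =====
-- The Python stack is kept head-first (head = stack top = stack[-1]); it is reversed
-- before the final slice stack[:k].

-- the inner `while drop and stack and stack[-1] < digit: stack.pop(); drop -= 1`
def popA : List Int → Int → Int → List Int × Int
  | [], d, _ => ([], d)
  | t :: s, d, x => if d ≠ 0 ∧ t < x then popA s (d - 1) x else (t :: s, d)

-- the `for digit in nums` loop over the state (stack, drop)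
def runA : List Int → List Int × Int → List Int × Int
  | [], st => st
  | x :: xs, (s, d) =>
      let sd := popA s d x
      runA xs (x :: sd.1, sd.2)

def single_max (nums : List Int) (k : Int) : List Int :=
  let drop : Int := (nums.length : Int) - k
  let st := runA nums ([], drop)
  PySem.List.slice st.1.reverse none (some k)

-- ===== PORT B =====
def single_max_alt (nums : List Int) (k : Int) : List Int :=
  let n : Int := nums.length
  let t : Int := min k n
  let st := (PySem.List.pyRange 0 t 1).foldl (fun (st : List Int × Int) i =>
    let res := st.1
    let start := st.2
    let e : Int := n - (t - 1 - i)
    let best := (PySem.List.pyRange (start + 1) e 1).foldl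
      (fun best j => if PySem.List.pyGetD nums j 0 > PySem.List.pyGetD nums best 0 then j else best)
      start
    (res ++ [PySem.List.pyGetD nums best 0], best + 1)) ([], 0)
  st.1

-- ===== PRECONDITION & SPEC =====
-- Pre_ excludes k < 0, where A's value is the artefact of a negative slice stack[:k]
-- (usually [] but not always) and B naturally returns [].
def Pre_single_max (nums : List Int) (k : Int) : Prop := 0 ≤ k
instance (nums : List Int) (k : Int) : Decidable (Pre_single_max nums k) := by
  unfold Pre_single_max; infer_instance

def pvWitness_single_max : List Int × Int := ([2, 1, 3, 1], 2)

-- For k > len(nums) on a list with an adjacent increasing pair, A returns its pruned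
-- non-increasing stack (the negative drop counter stays truthy so elements keep getting
-- popped), while B returns the whole list, which is the intended maximal selection when
-- more elements are requested than exist.
-- adjacent non-increasing test (Bool, so the condition is checkable by `decide`)
def nonInc : List Int → Bool
  | [] => true
  | [_] => true
  | x :: y :: t => y ≤ x && nonInc (y :: t)

def D_single_max (nums : List Int) (k : Int) : Prop :=
  (nums.length : Int) < k ∧ nonInc nums = false
instance (nums : List Int) (k : Int) : Decidable (D_single_max nums k) := by
  unfold D_single_max; infer_instance

def Spec_single_max (nums : List Int) (k : Int) (out : List Int) : Prop :=
  ¬ D_single_max nums k → out = single_max_alt nums k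
instance (nums : List Int) (k : Int) (out : List Int) : Decidable (Spec_single_max nums k out) := by
  unfold Spec_single_max; infer_instance

def pvDiffWitness_single_max : List Int × Int := ([1, 2], 3)
def pvDiffWitnessOut_single_max : (List Int) × (List Int) := ([2], [1, 2])

-- ===== CLAIM (what is proved, stated in full; the proofs are below) =====
def Claim_unchanged_single_max : Prop := ∀ (nums : List Int) (k : Int), Dom_single_max nums k → Pre_single_max nums k → Spec_single_max nums k (single_max nums k)
def Claim_exact_single_max : Prop := ∀ (nums : List Int) (k : Int), Dom_single_max nums k → Pre_single_max nums k → D_single_max nums k → single_max nums k ≠ single_max_alt nums k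
def Claim_changed_single_max : Prop := Dom_single_max (pvDiffWitness_single_max.1) (pvDiffWitness_single_max.2) ∧ Pre_single_max (pvDiffWitness_single_max.1) (pvDiffWitness_single_max.2) ∧ D_single_max (pvDiffWitness_single_max.1) (pvDiffWitness_single_max.2) ∧ single_max (pvDiffWitness_single_max.1) (pvDiffWitness_single_max.2) = pvDiffWitnessOut_single_max.1 ∧ single_max_alt (pvDiffWitness_single_max.1) (pvDiffWitness_single_max.2) = pvDiffWitnessOut_single_max.2 ∧ pvDiffWitnessOut_single_max.1 ≠ pvDiffWitnessOut_single_max.2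

-- ===== LEMMAS AND PROOFS =====

-- ---- common spec: slot-by-slot first-argmax greedy over shrinking windows ----

def maxL (a : Int) (l : List Int) : Int := l.foldl max a

-- index of the first maximum of a list
def fai : List Int → Nat
  | [] => 0
  | x :: xs => if maxL x xs = x then 0 else fai xs + 1

def greedy : List Int → Nat → List Int
  | _, 0 => []
  | l, (kk + 1) =>
      let w := l.take (l.length - kk)
      let j := fai w
      l.getD j 0 :: greedy (l.drop (j + 1)) kk

theorem le_maxL (a : Int) (l : List Int) : a ≤ maxL a l := by
  induction l generalizing a with
  | nil => simp [maxL]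
  | cons x xs ih =>
      have := ih (max a x)
      simp only [maxL, List.foldl_cons] at *
      exact le_trans (le_max_left a x) this

theorem mem_le_maxL (a : Int) (l : List Int) : ∀ y ∈ l, y ≤ maxL a l := by
  induction l generalizing a with
  | nil => simp
  | cons x xs ih =>
      intro y hy
      rcases List.mem_cons.1 hy with h | h
      · subst h
        exact le_trans (le_max_right a y) (le_maxL _ _)
      · exact ih (max a x) y h

theorem maxL_max (l : List Int) : ∀ a b : Int, maxL (max a b) l = max a (maxL b l) := by
  induction l with
  | nil => intro a b; simp [maxL]
  | cons c l ih =>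
      intro a b
      simp only [maxL, List.foldl_cons] at *
      rw [max_assoc, ih]

theorem fai_getD : ∀ (x : Int) (xs : List Int), (x :: xs).getD (fai (x :: xs)) 0 = maxL x xs := by
  intro x xs
  induction xs generalizing x with
  | nil => simp [fai, maxL]
  | cons y ys ih =>
      by_cases hx : maxL x (y :: ys) = x
      · simp [fai, hx]
      · have hm : maxL x (y :: ys) = max x (maxL y ys) := by
          rw [show maxL x (y :: ys) = maxL (max x y) ys from rfl, maxL_max]
        have : maxL x (y :: ys) = maxL y ys := by
          rw [hm]
          rcases max_choice x (maxL y ys) with h | h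
          · exact absurd (hm ▸ h) hx
          · exact h
        have hfx : fai (x :: y :: ys) = fai (y :: ys) + 1 := by
          rw [fai, if_neg hx]
        rw [hfx, List.getD_cons_succ, ih y, this]

theorem getD_fai_max (l : List Int) (h : l ≠ []) : ∀ y ∈ l, y ≤ l.getD (fai l) 0 := by
  rcases l with _ | ⟨x, xs⟩
  · simp at h
  · intro y hy
    rw [fai_getD]
    rcases List.mem_cons.1 hy with rfl | hy
    · exact le_maxL y xs
    · exact mem_le_maxL x xs y hy

theorem fai_lt (l : List Int) (h : l ≠ []) : fai l < l.length := by
  induction l with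
  | nil => simp at h
  | cons x xs ih =>
      by_cases hx : maxL x xs = x
      · simp [fai, hx]
      · have hxs : xs ≠ [] := by rintro rfl; simp [maxL] at hx
        have := ih hxs
        simp only [fai, hx, if_false, List.length_cons]
        omega

theorem fai_max (l : List Int) (h : l ≠ []) :
    ∀ i (hi : i < l.length), l[i] ≤ l.getD (fai l) 0 :=
  fun _ hi => getD_fai_max l h _ (List.getElem_mem hi)

theorem fai_first (l : List Int) (h : l ≠ []) :
    ∀ i, i < fai l → ∀ (hi : i < l.length), l[i] < l.getD (fai l) 0 := by
  induction l with
  | nil => simp at h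
  | cons x xs ih =>
      by_cases hx : maxL x xs = x
      · intro i hilt
        simp [fai, hx] at hilt
      · have hxs : xs ≠ [] := by rintro rfl; simp [maxL] at hx
        intro i hilt hi
        simp only [fai, hx, if_false, List.getD_cons_succ] at hilt ⊢
        rcases i with _ | i
        · rcases xs with _ | ⟨y, ys⟩
          · simp at hxs
          · simp only [List.getElem_cons_zero]
            rw [fai_getD]
            have hm : maxL x (y :: ys) = max x (maxL y ys) := by
              rw [show maxL x (y :: ys) = maxL (max x y) ys from rfl, maxL_max]
            rcases le_or_gt (maxL y ys) x with hle | hlt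
            · exact absurd (by rw [hm, max_eq_left hle]) hx
            · exact hlt
        · simp only [List.getElem_cons_succ]
          exact ih hxs i (by omega) _

-- ---- A-side: popA bookkeeping ----

theorem popA_subset (s : List Int) (d x : Int) : ∀ y ∈ (popA s d x).1, y ∈ s := by
  induction s generalizing d with
  | nil => simp [popA]
  | cons t s ih =>
      intro y hy
      simp only [popA] at hy
      split at hy
      · exact List.mem_cons_of_mem _ (ih (d - 1) y hy)
      · exact hy

theorem popA_snd (s : List Int) (d x : Int) :
    (popA s d x).2 = d - s.length + (popA s d x).1.length := by
  induction s generalizing d with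
  | nil => simp [popA]
  | cons t s ih =>
      simp only [popA]
      split
      · have := ih (d - 1)
        simp only [List.length_cons]
        push_cast
        omega
      · simp

theorem popA_nonneg (s : List Int) (d x : Int) (hd : 0 ≤ d) : 0 ≤ (popA s d x).2 := by
  induction s generalizing d with
  | nil => simpa [popA]
  | cons t s ih =>
      simp only [popA]
      split
      · rename_i hcond
        exact ih (d - 1) (by omega)
      · simpa

theorem popA_all (s : List Int) (x : Int) : ∀ d : Int, (∀ y ∈ s, y < x) →
    (s.length : Int) ≤ d → popA s d x = ([], d - s.length) := by
  induction s with
  | nil => intro d _ _; simp [popA]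
  | cons t s ih =>
      intro d hall hd
      have ht : t < x := hall t List.mem_cons_self
      have hd0 : d ≠ 0 := by simp at hd; omega
      show (if d ≠ 0 ∧ t < x then popA s (d - 1) x else (t :: s, d)) = _
      rw [if_pos ⟨hd0, ht⟩,
        ih (d - 1) (fun y hy => hall y (List.mem_cons_of_mem _ hy)) (by simp at hd ⊢; omega)]
      simp only [List.length_cons]
      congr 1
      push_cast
      ring

-- if the part of the stack above the bottom element does not all get popped,
-- the bottom is untouched; if it does, the bottom still survives provided
-- 0 ≤ d and the incoming digit is ≤ bottom whenever drop remains
theorem popA_append_bottom (s : List Int) (d x b : Int) (hd : 0 ≤ d)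
    (hx : (s.length : Int) < d → x ≤ b) :
    popA (s ++ [b]) d x = ((popA s d x).1 ++ [b], (popA s d x).2) := by
  induction s generalizing d with
  | nil =>
      simp only [popA, List.nil_append]
      split
      · rename_i hcond
        have : x ≤ b := hx (by simpa using lt_of_le_of_ne hd (Ne.symm hcond.1))
        omega
      · rfl
  | cons t s ih =>
      simp only [List.cons_append, popA]
      split
      · exact ih (d - 1) (by rename_i hc; omega)
          (fun h => hx (by simp at h ⊢; omega))
      · rfl

-- ---- A-side: runA simulation ----

theorem runA_clear_pre (pre : List Int) (b : Int) (suf : List Int) :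
    ∀ (s : List Int) (d : Int), (∀ y ∈ pre, y < b) → (∀ y ∈ s, y < b) →
    (pre.length : Int) + s.length ≤ d →
    runA (pre ++ b :: suf) (s, d) = runA suf ([b], d - pre.length - s.length) := by
  induction pre with
  | nil =>
      intro s d _ hs hd
      simp only [List.nil_append, runA]
      rw [popA_all s b d hs (by simp at hd; omega)]
      simp only [List.length_nil]
      norm_num
  | cons p pre ih =>
      intro s d hpre hs hd
      simp only [List.cons_append, runA]
      have hsub := popA_subset s d p
      have hsnd := popA_snd s d p
      rw [ih (p :: (popA s d p).1) (popA s d p).2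
        (fun y hy => hpre y (List.mem_cons_of_mem _ hy))
        (by
          intro y hy
          rcases List.mem_cons.1 hy with rfl | hy
          · exact hpre y List.mem_cons_self
          · exact hs y (hsub y hy))
        (by simp only [List.length_cons] at hd ⊢; push_cast at hd ⊢; omega)]
      have hAB : (popA s d p).2 - ((pre.length : Int)) - ((p :: (popA s d p).1).length : Int)
          = d - (((p :: pre).length : Int)) - (s.length : Int) := by
        simp only [List.length_cons]
        push_cast
        omega
      rw [hAB]

theorem runA_bottom (suf : List Int) :
    ∀ (s : List Int) (d b : Int), 0 ≤ d →
    (∀ (p : Nat) (hp : p < suf.length), (p : Int) + s.length < d → suf[p] ≤ b) →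
    runA suf (s ++ [b], d) = ((runA suf (s, d)).1 ++ [b], (runA suf (s, d)).2) := by
  induction suf with
  | nil => intro s d b _ _; rfl
  | cons x suf ih =>
      intro s d b hd hyp
      simp only [runA]
      rw [popA_append_bottom s d x b hd
        (fun h => by
          have := hyp 0 (by simp) (by simpa using h)
          simpa using this)]
      have hsnd := popA_snd s d x
      refine ih (x :: (popA s d x).1) (popA s d x).2 b (popA_nonneg s d x hd) ?_
      intro p hp hlt
      refine hyp (p + 1) (by simpa using hp) ?_
      simp only [List.length_cons] at hlt
      push_cast at hlt ⊢
      omega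

-- the final stack of A, truncated to k, is exactly the greedy selection
theorem runA_greedy : ∀ (kk : Nat) (l : List Int), kk ≤ l.length →
    ((runA l ([], (l.length : Int) - kk)).1.reverse.take kk) = greedy l kk := by
  intro kk
  induction kk with
  | zero => intro l _; simp [greedy]
  | succ kk ih =>
      intro l hk
      set n := l.length with hn
      set w := l.take (n - kk) with hw
      have hwlen : w.length = n - kk := by
        rw [hw]; simp [hn]
      have hwne : w ≠ [] := by
        intro h0
        rw [h0] at hwlen
        simp at hwlen
        omega
      set j := fai w with hj
      have hjw : j < w.length := fai_lt w hwne
      have hjn : j < n := by omega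
      have hsplit : l = l.take j ++ l[j] :: l.drop (j + 1) := by
        conv_lhs => rw [← List.take_append_drop j l]
        congr 1
        exact (List.getElem_cons_drop hjn).symm
      have hwj : w.getD j 0 = l[j] := by
        rw [List.getD_eq_getElem w 0 hjw]
        exact List.getElem_take
      -- step 1: the prefix before the first max gets fully cleared
      have h1 : runA l ([], (n : Int) - (kk + 1)) =
          runA (l.drop (j + 1)) ([l[j]], (n : Int) - (kk + 1) - j) := by
        conv_lhs => rw [hsplit]
        rw [runA_clear_pre (l.take j) (l[j]) (l.drop (j + 1)) [] ((n : Int) - (kk + 1))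
          (by
            intro y hy
            rw [List.mem_iff_getElem] at hy
            obtain ⟨i, hi, rfl⟩ := hy
            have hij : i < j := by simp only [List.length_take] at hi; omega
            have hIl : i < l.length := by omega
            have e1 : (l.take j)[i]'hi = l[i]'hIl := List.getElem_take
            have e2 : w[i]'(by omega) = l[i]'hIl := List.getElem_take
            rw [e1, ← e2, ← hwj]
            exact fai_first w hwne i hij (by omega))
          (by simp)
          (by
            simp only [List.length_take, List.length_nil]
            push_cast
            omega)]
        congr 2
        simp only [List.length_take, List.length_nil]
        have hmin : min j l.length = j := by omega
        rw [hmin]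
        push_cast
        ring
      -- step 2: the chosen max is never popped afterwards
      have h2 : runA (l.drop (j + 1)) ([l[j]], (n : Int) - (kk + 1) - j) =
          ((runA (l.drop (j + 1)) ([], (n : Int) - (kk + 1) - j)).1 ++ [l[j]],
           (runA (l.drop (j + 1)) ([], (n : Int) - (kk + 1) - j)).2) := by
        have := runA_bottom (l.drop (j + 1)) [] ((n : Int) - (kk + 1) - j) (l[j])
          (by omega)
          (by
            intro p hp hlt
            simp only [List.length_nil, Nat.cast_zero, add_zero] at hlt
            have hpl : j + 1 + p < n := by
              simp only [List.length_drop] at hp; omega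
            have hin : j + 1 + p < n - kk := by omega
            rw [List.getElem_drop]
            have e2 : w[j + 1 + p]'(by omega) = l[j + 1 + p]'hpl := List.getElem_take
            rw [← e2, ← hwj]
            exact fai_max w hwne (j + 1 + p) (by omega))
        simpa using this
      have hdrop : ((l.drop (j + 1)).length : Int) - kk = (n : Int) - (kk + 1) - j := by
        simp only [List.length_drop]
        omega
      have ihs := ih (l.drop (j + 1)) (by simp only [List.length_drop]; omega)
      rw [hdrop] at ihs
      calc (runA l ([], (n : Int) - (kk + 1))).1.reverse.take (kk + 1)
          = (l[j] :: (runA (l.drop (j + 1)) ([], (n : Int) - (kk + 1) - j)).1.reverse).take (kk + 1) := by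
            rw [h1, h2]; simp
        _ = l[j] :: greedy (l.drop (j + 1)) kk := by
            rw [List.take_succ_cons, ihs]
        _ = greedy l (kk + 1) := by
            conv_rhs => rw [greedy]
            rw [← hn, ← hw, ← hj]
            congr 1
            rw [List.getD_eq_getElem l 0 hjn]

-- ---- B-side: the inner scan computes the first argmax of the window ----

-- characterization of "first index of the maximum of g over [lo, hi)"
def IsFAI (g : Int → Int) (lo hi b : Int) : Prop :=
  lo ≤ b ∧ b < hi ∧ (∀ j, lo ≤ j → j < hi → g j ≤ g b) ∧ (∀ j, lo ≤ j → j < b → g j < g b)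

theorem isFAI_unique (g : Int → Int) (lo hi b1 b2 : Int)
    (h1 : IsFAI g lo hi b1) (h2 : IsFAI g lo hi b2) : b1 = b2 := by
  obtain ⟨hlo1, hhi1, hle1, hlt1⟩ := h1
  obtain ⟨hlo2, hhi2, hle2, hlt2⟩ := h2
  rcases lt_trichotomy b1 b2 with h | h | h
  · have := hlt2 b1 hlo1 h
    have := hle2 b1 hlo1 hhi1  -- g b1 ≤ g b2 (unused direction)
    have := hle1 b2 hlo2 hhi2
    omega
  · exact h
  · have := hlt1 b2 hlo2 h
    have := hle2 b1 hlo1 hhi1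
    omega

theorem inner_fold_isFAI (g : Int → Int) :
    ∀ (m : Nat) (a e b lo : Int), e - a = m → a ≤ e → IsFAI g lo a b →
    IsFAI g lo e ((PySem.List.pyRange a e 1).foldl
      (fun best j => if g j > g best then j else best) b) := by
  intro m
  induction m with
  | zero =>
      intro a e b lo hm hae hb
      have : e ≤ a := by omega
      rw [PySem.List.pyRange_one_eq_nil this]
      simp only [List.foldl_nil]
      obtain ⟨h1, h2, h3, h4⟩ := hb
      exact ⟨h1, by omega, fun j hj1 hj2 => h3 j hj1 (by omega), h4⟩
  | succ m ihm =>
      intro a e b lo hm hae hb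
      have hlt : a < e := by omega
      rw [PySem.List.pyRange_one_cons hlt]
      simp only [List.foldl_cons]
      obtain ⟨h1, h2, h3, h4⟩ := hb
      refine ihm (a + 1) e _ lo (by omega) (by omega) ?_
      by_cases hc : g a > g b
      · rw [if_pos hc]
        exact ⟨by omega, by omega,
          fun j hj1 hj2 => by
            rcases eq_or_lt_of_le (show j ≤ a by omega) with rfl | hja
            · exact le_refl _
            · exact le_trans (h3 j hj1 (by omega)) (le_of_lt hc),
          fun j hj1 hj2 => by
            rcases lt_or_ge j b with hjb | hjb
            · exact lt_trans (h4 j hj1 hjb) hc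
            · rcases eq_or_lt_of_le hjb with rfl | hjb'
              · exact hc
              · exact lt_of_le_of_lt (h3 j hj1 (by omega)) hc⟩
      · rw [if_neg hc]
        exact ⟨h1, by omega,
          fun j hj1 hj2 => by
            rcases eq_or_lt_of_le (show j ≤ a by omega) with rfl | hja
            · omega
            · exact h3 j hj1 (by omega),
          h4⟩

-- fai of the window, characterized relative to the full list
theorem fai_isFAI (nums : List Int) (start width : Nat) (hw : 0 < width)
    (hend : start + width ≤ nums.length) :
    IsFAI (fun j => PySem.List.pyGetD nums j 0) (start) (start + width)
      ((start : Int) + fai ((nums.drop start).take width)) := by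
  set w := (nums.drop start).take width with hwdef
  have hwlen : w.length = width := by
    rw [hwdef]; simp; omega
  have hwne : w ≠ [] := by
    intro h; rw [h] at hwlen; simp at hwlen; omega
  have hj := fai_lt w hwne
  set j := fai w with hj'
  have hg : ∀ (m : Nat) (hm : m < width), PySem.List.pyGetD nums ((start : Int) + m) 0 = w[m]'(by omega) := by
    intro m hm
    have hcast : (start : Int) + (m : Int) = ((start + m : Nat) : Int) := by push_cast; ring
    rw [hcast, PySem.List.pyGetD_natCast]
    rw [List.getD_eq_getElem nums 0 (by omega)]
    have e1 : w[m]'(by omega) = (nums.drop start)[m]'(by simp; omega) := List.getElem_take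
    have e2 : (nums.drop start)[m]'(by simp; omega) = nums[start + m]'(by omega) := List.getElem_drop
    rw [← e2, ← e1]
  have hwj : w.getD j 0 = w[j]'(by omega) := List.getD_eq_getElem w 0 (by omega)
  refine ⟨by omega, by omega, ?_, ?_⟩
  · intro i hi1 hi2
    show PySem.List.pyGetD nums i 0 ≤ PySem.List.pyGetD nums ((start : Int) + (j : Int)) 0
    have hm : i = (start : Int) + ((i - start).toNat : Int) := by omega
    rw [hm, hg (i - start).toNat (by omega), hg j (by omega)]
    have := fai_max w hwne (i - start).toNat (by omega)
    rwa [hwj] at this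
  · intro i hi1 hi2
    show PySem.List.pyGetD nums i 0 < PySem.List.pyGetD nums ((start : Int) + (j : Int)) 0
    have hm : i = (start : Int) + ((i - start).toNat : Int) := by omega
    rw [hm, hg (i - start).toNat (by omega), hg j (by omega)]
    have := fai_first w hwne (i - start).toNat (by omega) (by omega)
    rwa [hwj] at this

-- the outer loop of B accumulates the greedy selection

-- the body of B's outer loop, named so the fold can be peeled step by step
def stepB (nums : List Int) (k : Int) (st : List Int × Int) (i : Int) : List Int × Int :=
  let res := st.1
  let start := st.2
  let e : Int := (nums.length : Int) - (k - 1 - i)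
  let best := (PySem.List.pyRange (start + 1) e 1).foldl
    (fun best j => if PySem.List.pyGetD nums j 0 > PySem.List.pyGetD nums best 0 then j else best)
    start
  (res ++ [PySem.List.pyGetD nums best 0], best + 1)

theorem alt_eq_fold (nums : List Int) (k : Int) :
    single_max_alt nums k
      = ((PySem.List.pyRange 0 (min k (nums.length : Int)) 1).foldl
          (stepB nums (min k (nums.length : Int))) ([], 0)).1 := rfl

theorem alt_outer (nums : List Int) (k : Int) :
    ∀ (kk : Nat) (start : Nat) (res : List Int), (kk : Int) ≤ k → start + kk ≤ nums.length →
    ((PySem.List.pyRange (k - kk) k 1).foldl (stepB nums k) (res, (start : Int))).1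
    = res ++ greedy (nums.drop start) kk := by
  intro kk
  induction kk with
  | zero =>
      intro start res _ _
      rw [PySem.List.pyRange_one_eq_nil (by omega)]
      simp [greedy]
  | succ kk ih =>
      intro start res hkk hsn
      set n := nums.length with hn
      rw [PySem.List.pyRange_one_cons (by omega), List.foldl_cons]
      set i : Int := k - (((kk + 1 : Nat)) : Int) with hi
      have he : (n : Int) - (k - 1 - i) = (n : Int) - kk := by rw [hi]; push_cast; ring
      set width : Nat := n - kk - start with hwidth
      have hwpos : 0 < width := by omega
      have hwin : start + width ≤ n := by omega
      set l' := nums.drop start with hl'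
      have hl'len : l'.length = n - start := by rw [hl', List.length_drop, hn]
      have hwl' : l'.take (l'.length - kk) = (nums.drop start).take width := by
        rw [hl', hwidth]
        congr 1
        simp
        omega
      set j := fai ((nums.drop start).take width) with hjdef
      have hjw : j < width := by
        have := fai_lt ((nums.drop start).take width)
          (by
            intro hnil
            have : ((nums.drop start).take width).length = 0 := by rw [hnil]; rfl
            simp at this
            omega)
        have hlen : ((nums.drop start).take width).length = width := by simp; omega
        omega
      -- the inner fold equals start + j
      have hbest : ((PySem.List.pyRange ((start : Int) + 1) ((n : Int) - (k - 1 - i)) 1).foldl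
          (fun best jj => if PySem.List.pyGetD nums jj 0 > PySem.List.pyGetD nums best 0 then jj else best)
          (start : Int)) = (start : Int) + (j : Int) := by
        rw [he]
        have hfold := inner_fold_isFAI (fun jj => PySem.List.pyGetD nums jj 0)
          ((n : Int) - kk - (start + 1)).toNat ((start : Int) + 1) ((n : Int) - kk)
          (start : Int) (start : Int) (by omega) (by omega)
          ⟨le_refl _, by omega, fun jj h1 h2 => by
            have : jj = (start : Int) := by omega
            rw [this], fun jj h1 h2 => by omega⟩
        have hfai := fai_isFAI nums start width hwpos (by omega)
        have hsw : (start : Int) + (width : Int) = (n : Int) - kk := by omega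
        rw [hsw] at hfai
        exact isFAI_unique _ (start : Int) ((n : Int) - kk) _ _ hfold hfai
      have hcast : (start : Int) + (j : Int) = ((start + j : Nat) : Int) := by push_cast; ring
      have hgd : PySem.List.pyGetD nums ((start : Int) + (j : Int)) 0 = l'.getD j 0 := by
        rw [hcast, PySem.List.pyGetD_natCast]
        rw [List.getD_eq_getElem nums 0 (by omega), List.getD_eq_getElem l' 0 (by rw [hl'len]; omega)]
        exact (List.getElem_drop).symm
      -- the peeled first step of the outer fold
      have hstate : stepB nums k (res, (start : Int)) i
          = (res ++ [l'.getD j 0], ((start + j + 1 : Nat) : Int)) := by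
        simp only [stepB]
        rw [hbest, hgd]
        refine Prod.ext_iff.mpr ⟨rfl, ?_⟩
        push_cast
        ring
      rw [hstate, show i + 1 = k - (kk : Int) from by rw [hi]; push_cast; ring]
      rw [ih (start + j + 1) (res ++ [l'.getD j 0]) (by omega) (by omega)]
      have hdrop2 : nums.drop (start + j + 1) = l'.drop (j + 1) := by
        rw [hl', List.drop_drop, Nat.add_assoc]
      rw [hdrop2]
      conv_rhs => rw [greedy]
      rw [hwl', ← hjdef]
      simp

theorem single_max_alt_eq_greedy (nums : List Int) (k : Int)
    (hk0 : 0 ≤ k) (hkn : k ≤ (nums.length : Int)) :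
    single_max_alt nums k = greedy nums k.toNat := by
  rw [alt_eq_fold, min_eq_left hkn]
  have h0 : k - (k.toNat : Int) = 0 := by omega
  have := alt_outer nums k k.toNat 0 [] (by omega) (by omega)
  rw [h0] at this
  simp only [Nat.cast_zero] at this
  rw [this]
  simp

-- the greedy selection of all elements is the whole list
theorem greedy_full : ∀ (l : List Int), greedy l l.length = l := by
  intro l
  induction l with
  | nil => simp [greedy]
  | cons x xs ih =>
      show greedy (x :: xs) (xs.length + 1) = x :: xs
      rw [greedy]
      have h1 : (x :: xs).length - xs.length = 1 := by simp
      rw [h1]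
      have h2 : (x :: xs).take 1 = [x] := by simp
      rw [h2]
      have h3 : fai [x] = 0 := by simp [fai, maxL]
      rw [h3]
      simpa using ih

-- B on k ≥ len(nums): the clamp t = min k n makes every window a singleton,
-- so B returns the whole list
theorem single_max_alt_of_ge (nums : List Int) (k : Int)
    (hkn : (nums.length : Int) ≤ k) :
    single_max_alt nums k = nums := by
  rw [alt_eq_fold, min_eq_right hkn]
  have h0 : (nums.length : Int) - ((nums.length : Nat) : Int) = 0 := by omega
  have := alt_outer nums (nums.length : Int) nums.length 0 [] (by omega) (by omega)
  rw [h0] at this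
  simp only [Nat.cast_zero] at this
  rw [this]
  simp [greedy_full]

-- A never pops on a non-increasing list: the stack replays the input
theorem runA_chain : ∀ (l : List Int) (x : Int) (s : List Int) (d : Int),
    nonInc (x :: l) = true →
    runA l (x :: s, d) = ((x :: l).reverse ++ s, d) := by
  intro l
  induction l with
  | nil => intro x s d _; simp [runA]
  | cons y l ih =>
      intro x s d hch
      have hyx : y ≤ x := by
        simp [nonInc] at hch
        exact hch.1
      have hch' : nonInc (y :: l) = true := by
        simp [nonInc] at hch ⊢
        rcases l with _ | ⟨z, l'⟩
        · simp [nonInc]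
        · simp [nonInc] at hch ⊢
          exact hch.2
      show runA (y :: l) (x :: s, d) = _
      rw [runA]
      have hpop : popA (x :: s) d y = (x :: s, d) := by
        rw [popA, if_neg (by rintro ⟨-, hlt⟩; omega)]
      rw [hpop]
      rw [ih y (x :: s) d hch']
      simp

-- A on k ≥ len(nums) with a non-increasing list returns the whole list
theorem single_max_of_ge_chain (nums : List Int) (k : Int) (hk0 : 0 ≤ k)
    (hkn : (nums.length : Int) ≤ k)
    (hch : nonInc nums = true) :
    single_max nums k = nums := by
  unfold single_max
  rw [PySem.List.slice_to _ hk0]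
  rcases nums with _ | ⟨x, xs⟩
  · simp [runA]
  · show (runA (x :: xs) ([], (((x :: xs).length : Int) - k)) ).1.reverse.take k.toNat = x :: xs
    rw [runA]
    have hpop : popA [] (((x :: xs).length : Int) - k) x = ([], ((x :: xs).length : Int) - k) := by
      rfl
    rw [hpop, runA_chain xs x [] (((x :: xs).length : Int) - k) hch]
    simp only [List.append_nil, List.reverse_reverse]
    refine List.take_of_length_le ?_
    simp at hkn ⊢
    omega

theorem single_max_eq_greedy (nums : List Int) (k : Int)
    (hk0 : 0 ≤ k) (hkn : k ≤ (nums.length : Int)) :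
    single_max nums k = greedy nums k.toNat := by
  unfold single_max
  have hkk : ((nums.length : Int) - k) = ((nums.length : Int) - (k.toNat : Int)) := by omega
  have hrun := runA_greedy k.toNat nums (by omega)
  rw [PySem.List.slice_to _ hk0]
  rw [← hkk] at hrun
  exact hrun

-- ---- tightness: inside D_ a pop always occurs, so A's result is shorter than B's ----

theorem popA_len_le (s : List Int) (d x : Int) : (popA s d x).1.length ≤ s.length := by
  induction s generalizing d with
  | nil => simp [popA]
  | cons t s ih =>
      simp only [popA]
      split
      · exact le_trans (ih (d - 1)) (by simp)
      · simp

theorem runA_len_le : ∀ (l s : List Int) (d : Int),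
    (runA l (s, d)).1.length ≤ s.length + l.length := by
  intro l
  induction l with
  | nil => intro s d; simp [runA]
  | cons x xs ih =>
      intro s d
      simp only [runA]
      refine le_trans (ih _ _) ?_
      have := popA_len_le s d x
      simp only [List.length_cons]
      omega

theorem runA_len_lt : ∀ (l : List Int) (x : Int) (s : List Int) (d : Int),
    d < 0 → nonInc (x :: l) = false →
    (runA l (x :: s, d)).1.length ≤ l.length + s.length := by
  intro l
  induction l with
  | nil => intro x s d _ hni; simp [nonInc] at hni
  | cons y l ih =>
      intro x s d hd hni
      show (runA (y :: l) (x :: s, d)).1.length ≤ _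
      rw [runA]
      by_cases hxy : x < y
      · -- the increase pops x immediately; afterwards at most |s| + 1 + |l| survive
        have hpop : popA (x :: s) d y = popA s (d - 1) y := by
          rw [popA, if_pos ⟨by omega, hxy⟩]
        rw [hpop]
        refine le_trans (runA_len_le l _ _) ?_
        have := popA_len_le s (d - 1) y
        simp only [List.length_cons]
        omega
      · have hpop : popA (x :: s) d y = (x :: s, d) := by
          rw [popA, if_neg (by rintro ⟨-, hlt⟩; omega)]
        rw [hpop]
        have hyx : y ≤ x := by omega
        have hni' : nonInc (y :: l) = false := by
          have hstep : nonInc (x :: y :: l) = (decide (y ≤ x) && nonInc (y :: l)) := rfl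
          rw [hstep] at hni
          simpa [hyx] using hni
        have := ih y (x :: s) d hd hni'
        simp only [List.length_cons] at this ⊢
        omega

theorem single_max_len_lt (nums : List Int) (k : Int)
    (hgt : (nums.length : Int) < k)
    (hni : nonInc nums = false) :
    (single_max nums k).length < nums.length := by
  unfold single_max
  rw [PySem.List.slice_to _ (by omega)]
  rcases nums with _ | ⟨x, xs⟩
  · simp [nonInc] at hni
  · show (List.take k.toNat (runA (x :: xs) ([], ((x :: xs).length : Int) - k)).1.reverse).length
        < (x :: xs).length
    rw [runA]
    have hpop : popA [] (((x :: xs).length : Int) - k) x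
        = ([], ((x :: xs).length : Int) - k) := rfl
    rw [hpop]
    have hlt := runA_len_lt xs x [] (((x :: xs).length : Int) - k)
      (by simp at hgt ⊢; omega) hni
    simp only [List.length_nil, Nat.add_zero] at hlt
    simp only [List.length_take, List.length_reverse, List.length_cons] at hlt ⊢
    push_cast at hlt ⊢
    omega

-- ===== VERDICT (by name: the statement is the Claim_ definition above) =====
theorem single_max_spec : Claim_unchanged_single_max := by
  intro nums k _ hpre hnd
  unfold Pre_single_max at hpre
  unfold D_single_max at hnd
  rcases le_or_gt k (nums.length : Int) with hle | hgt
  · rw [single_max_eq_greedy nums k hpre hle,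
        single_max_alt_eq_greedy nums k hpre hle]
  · have hch : nonInc nums = true := by
      by_contra hfalse
      exact hnd ⟨hgt, by simpa using hfalse⟩
    rw [single_max_of_ge_chain nums k hpre (by omega) hch,
        single_max_alt_of_ge nums k (by omega)]

theorem single_max_changed : Claim_changed_single_max := by
  unfold Claim_changed_single_max
  decide

theorem single_max_tight : Claim_exact_single_max := by
  intro nums k _ _ hd heq
  obtain ⟨hgt, hni⟩ := hd
  have hB : single_max_alt nums k = nums := single_max_alt_of_ge nums k (by omega)
  have hlen := single_max_len_lt nums k hgt hni
  rw [heq, hB] at hlen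
  omega
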